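-- pv_equiv track=rewrite | github.com/HamidRezaKhoram/labs | ass2/labs109.py | colour_trio
-- ===== SOURCE A (Python) =====
-- def colour_trio(colours):
--     length = len(colours)
--     tempStr = ""
--     firstColor = "r"
--     secondColor = "b"
--     thirdColor = "r"
--     while length > 1:
--         for i in range(len(colours) - 1):
--             if colours[i] == "r":
--                 firstColor = "r"
--                 secondColor = "b"
--                 thirdColor = "y"
--             elif colours[i] == "b":
--                 firstColor = "b"
--                 secondColor = "r"
--                 thirdColor = "y"
--             elif colours[i] == "y":
--                 firstColor = "y"
--                 secondColor = "b"
--                 thirdColor = "r"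
--             if colours[i + 1] == firstColor:
--                 tempStr += firstColor
--             elif colours[i + 1] == secondColor:
--                 tempStr += thirdColor
--             elif colours[i + 1] == thirdColor:
--                 tempStr += secondColor
--         length -= 1
--         colours = tempStr
--         tempStr = ""
--
--     return colours
-- ===== SOURCE B (Python) =====
-- _V = {"r": 0, "b": 1, "y": 2}
--
--
-- def _c3(nd, i):
--     # C(nd, i) % 3 for base-3 digits 0 <= i <= nd <= 2
--     return 2 if (nd, i) == (2, 1) else 1
--
--
-- def _binom3(n, i):
--     # C(n, i) % 3 by Lucas' theorem, one base-3 digit per recursive step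
--     if n == 0 and i == 0:
--         return 1
--     nd, id_ = n % 3, i % 3
--     if id_ > nd:
--         return 0
--     return (_binom3(n // 3, i // 3) * _c3(nd, id_)) % 3
--
--
-- def colour_trio(colours):
--     # Collapsing a colour string of length m once replaces adjacent x, y by
--     # -(x+y) mod 3 (colours coded r=0, b=1, y=2); after the m-1 passes the
--     # single remaining colour is (-1)^(m-1) * sum_i C(m-1, i) * x_i  (mod 3).
--     # A string containing a non-colour character collapses to nothing.
--     if len(colours) < 2:
--         return colours
--     if any(c not in _V for c in colours):
--         return ""
--     n = len(colours) - 1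
--     total = 0
--     for i, c in enumerate(colours):
--         total += _binom3(n, i) * _V[c]
--     if n % 2 == 1:
--         total = -total
--     return "rby"[total % 3]
-- ===== Notes on version B (the rewrite author's own statement) =====
-- stated objective: faster
-- what changed: Replaces A's quadratic repeated pairwise-collapse loop by a one-pass validity check (a string containing a non-colour character collapses to "") plus the closed-form weighted binomial sum sum C(n,i)*x_i mod 3 over the input, each coefficient computed by Lucas' theorem on base-3 digits.
-- intended difference: On strings whose first character is the only non-colour character and whose second character is r or b, A returns a colour computed from its uninitialized defaults firstColor/secondColor (treating the junk character as red), while B returns the empty string as it does for every other string containing a non-colour character, the intended handling of invalid input. — e.g. on colour_trio("xb"): A returns "r", B returns ""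
import Mathlib
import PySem

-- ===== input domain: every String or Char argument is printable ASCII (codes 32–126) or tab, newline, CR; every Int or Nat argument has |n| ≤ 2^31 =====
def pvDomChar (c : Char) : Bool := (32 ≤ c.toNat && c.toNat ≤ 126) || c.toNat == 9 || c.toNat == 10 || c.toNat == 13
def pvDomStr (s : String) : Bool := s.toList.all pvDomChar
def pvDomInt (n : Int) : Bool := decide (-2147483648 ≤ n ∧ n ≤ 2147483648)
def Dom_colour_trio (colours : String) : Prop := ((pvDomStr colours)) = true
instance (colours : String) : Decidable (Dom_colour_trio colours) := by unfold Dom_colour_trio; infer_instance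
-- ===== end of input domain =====

-- B replaces A's quadratic repeated pairwise-collapse loop by an input-validity check
-- (a string with a non-colour character collapses to "") plus the closed-form weighted
-- binomial sum mod 3 (Lucas' theorem per coefficient); objective: faster.


-- ===== PORT A =====
-- the three `if colours[i] == …` branches updating (firstColor, secondColor, thirdColor)
def pvUpd (st : Char × Char × Char) (c : Char) : Char × Char × Char :=
  if c = 'r' then ('r', 'b', 'y')
  else if c = 'b' then ('b', 'r', 'y')
  else if c = 'y' then ('y', 'b', 'r')
  else st

-- the three `if colours[i+1] == …` branches appending to tempStr
def pvEmit (st : Char × Char × Char) (c : Char) : List Char :=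
  if c = st.1 then [st.1]
  else if c = st.2.1 then [st.2.2]
  else if c = st.2.2 then [st.2.1]
  else []

-- the inner `for i in range(len(colours) - 1)` loop: walks adjacent pairs, threading
-- the colour-state and building tempStr in order
def pvInner : List Char → Char × Char × Char → List Char × (Char × Char × Char)
  | a :: b :: rest, st =>
      let st1 := pvUpd st a
      let (out, st2) := pvInner (b :: rest) st1
      (pvEmit st1 b ++ out, st2)
  | _, st => ([], st)

-- the outer `while length > 1` loop: `length` is the separate counter A decrements
def pvOuter : Nat → List Char → Char × Char × Char → List Char
  | n + 2, cs, st =>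
      let (t, st') := pvInner cs st
      pvOuter (n + 1) t st'
  | _, cs, _ => cs

def colour_trio (colours : String) : String :=
  String.ofList (pvOuter colours.toList.length colours.toList ('r', 'b', 'r'))

-- ===== PORT B =====
-- `c in _V`
def pvIsColour (c : Char) : Bool := c == 'r' || c == 'b' || c == 'y'

-- _V[c]; Source B only reaches the lookup once every character passed the validity check
def pvVal (c : Char) : Int :=
  if c = 'r' then 0 else if c = 'b' then 1 else if c = 'y' then 2 else 0

-- _c3(nd, id): C(nd, id) % 3 for base-3 digits
def pvC3 (nd i : Nat) : Nat := if nd = 2 ∧ i = 1 then 2 else 1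

-- _binom3(n, i): C(n, i) % 3 via Lucas, one base-3 digit per recursive step.
-- Python's // and % on the nonnegative ints n, i are exactly Nat / and %.
-- The fuel argument only makes the recursion structural: n + i strictly decreases,
-- so fuel n + i is never exhausted (the fuel-0 branch coincides with the base case).
def pvBinom3Go : Nat → Nat → Nat → Nat
  | 0, _, _ => 1
  | fuel + 1, n, i =>
    if n = 0 ∧ i = 0 then 1
    else if i % 3 > n % 3 then 0
    else (pvBinom3Go fuel (n / 3) (i / 3) * pvC3 (n % 3) (i % 3)) % 3

def pvBinom3 (n i : Nat) : Nat := pvBinom3Go (n + i) n i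

-- the `for i, c in enumerate(colours)` accumulation loop, same state (i, total)
def pvSumLoop (n : Nat) : List Char → Nat → Int → Int
  | [], _, total => total
  | c :: rest, i, total => pvSumLoop n rest (i + 1) (total + (pvBinom3 n i : Int) * pvVal c)

def colour_trio_alt (colours : String) : String :=
  let cs := colours.toList
  if cs.length < 2 then colours
  else if cs.any (fun c => !pvIsColour c) then ""
  else
    let n := cs.length - 1
    let total := pvSumLoop n cs 0 0
    let total := if n % 2 = 1 then -total else total
    String.ofList [(['r', 'b', 'y']).getD (PySem.Int.mod total 3).toNat ' ']

-- ===== PRECONDITION & SPEC =====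
-- On strings whose FIRST character is the only non-colour character and whose second
-- character is r or b, A returns a colour computed from its uninitialized defaults
-- firstColor/secondColor (treating the junk character as red), while B returns the
-- empty string as it does for every other string containing a non-colour character —
-- the intended handling of invalid input.
def D_colour_trio (colours : String) : Prop :=
  2 ≤ colours.toList.length ∧
  (['r', 'b', 'y'] : List Char).contains (colours.toList.getD 0 ' ') = false ∧
  (colours.toList.getD 1 ' ' = 'r' ∨ colours.toList.getD 1 ' ' = 'b') ∧
  (colours.toList.drop 1).all (fun c => (['r', 'b', 'y'] : List Char).contains c) = true
instance (colours : String) : Decidable (D_colour_trio colours) := by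
  unfold D_colour_trio; infer_instance

def Spec_colour_trio (colours : String) (out : String) : Prop :=
  ¬ D_colour_trio colours → out = colour_trio_alt colours
instance (colours : String) (out : String) : Decidable (Spec_colour_trio colours out) := by
  unfold Spec_colour_trio; infer_instance

def pvDiffWitness_colour_trio : String := "xb"
def pvDiffWitnessOut_colour_trio : String × String := ("r", "")

-- ===== CLAIM (what is proved, stated in full; the proofs are below) =====
def Claim_unchanged_colour_trio : Prop := ∀ (colours : String), Dom_colour_trio colours → Spec_colour_trio colours (colour_trio colours)
def Claim_changed_colour_trio : Prop := Dom_colour_trio (pvDiffWitness_colour_trio) ∧ D_colour_trio (pvDiffWitness_colour_trio) ∧ colour_trio (pvDiffWitness_colour_trio) = pvDiffWitnessOut_colour_trio.1 ∧ colour_trio_alt (pvDiffWitness_colour_trio) = pvDiffWitnessOut_colour_trio.2 ∧ pvDiffWitnessOut_colour_trio.1 ≠ pvDiffWitnessOut_colour_trio.2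
def Claim_exact_colour_trio : Prop := ∀ (colours : String), Dom_colour_trio colours → D_colour_trio colours → colour_trio colours ≠ colour_trio_alt colours

-- ===== LEMMAS AND PROOFS =====

-- colour codes as elements of ZMod 3
def pvDec (c : Char) : ZMod 3 := if c = 'r' then 0 else if c = 'b' then 1 else 2
def pvEnc (v : ZMod 3) : Char := if v = 0 then 'r' else if v = 1 then 'b' else 'y'
def pvRby (c : Char) : Prop := c = 'r' ∨ c = 'b' ∨ c = 'y'

-- one collapse pass on codes
def pvStep (xs : List (ZMod 3)) : List (ZMod 3) := List.zipWith (fun a b => -(a + b)) xs xs.tail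

def pvIter : Nat → List (ZMod 3) → List (ZMod 3)
  | 0, xs => xs
  | k + 1, xs => pvIter k (pvStep xs)

-- the weighted binomial sum
def pvT (n : Nat) (xs : List (ZMod 3)) : ZMod 3 :=
  ∑ j ∈ Finset.range xs.length, (Nat.choose n j : ZMod 3) * xs.getD j 0

-- A's machine state always has r/b/y components
def pvStRby (st : Char × Char × Char) : Prop := pvRby st.1 ∧ pvRby st.2.1 ∧ pvRby st.2.2

theorem pvRby_iff (c : Char) : pvRby c ↔ pvIsColour c = true := by
  simp [pvRby, pvIsColour, or_assoc]

theorem pvRby_contains (c : Char) :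
    pvRby c ↔ (['r', 'b', 'y'] : List Char).contains c = true := by
  simp [pvRby]

theorem pvContains_true (c : Char) (h : pvIsColour c = true) :
    (['r', 'b', 'y'] : List Char).contains c = true :=
  (pvRby_contains c).mp ((pvRby_iff c).mpr h)

theorem pvContains_false (c : Char) (h : pvIsColour c = false) :
    (['r', 'b', 'y'] : List Char).contains c = false := by
  rw [Bool.eq_false_iff]
  intro ht
  rw [(pvRby_iff c).mp ((pvRby_contains c).mpr ht)] at h
  cases h

theorem length_pvStep (xs : List (ZMod 3)) : (pvStep xs).length = xs.length - 1 := by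
  simp [pvStep]

theorem getD_pvStep (xs : List (ZMod 3)) (j : Nat) (h : j + 1 < xs.length) :
    (pvStep xs).getD j 0 = -(xs.getD j 0 + xs.getD (j + 1) 0) := by
  have hj : j < (pvStep xs).length := by rw [length_pvStep]; omega
  rw [List.getD_eq_getElem _ _ hj, List.getD_eq_getElem _ _ (by omega : j < xs.length),
    List.getD_eq_getElem _ _ h]
  simp [pvStep, List.getElem_tail]

theorem pvT_step (n : Nat) (xs : List (ZMod 3)) (h : xs.length = n + 2) :
    pvT n (pvStep xs) = -pvT (n + 1) xs := by
  have hs : (pvStep xs).length = n + 1 := by simp [length_pvStep, h]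
  unfold pvT
  rw [hs, h]
  rw [Finset.sum_congr rfl (fun j hj => by
    rw [getD_pvStep xs j (by have := Finset.mem_range.mp hj; omega)])]
  rw [Finset.sum_range_succ' (fun j => (Nat.choose (n + 1) j : ZMod 3) * xs.getD j 0) (n + 1)]
  have e1 : ∑ j ∈ Finset.range (n + 1), (Nat.choose (n + 1) (j + 1) : ZMod 3) * xs.getD (j + 1) 0
      = ∑ j ∈ Finset.range (n + 1),
          ((Nat.choose n j : ZMod 3) * xs.getD (j + 1) 0
           + (Nat.choose n (j + 1) : ZMod 3) * xs.getD (j + 1) 0) := by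
    refine Finset.sum_congr rfl fun j _ => ?_
    rw [Nat.choose_succ_succ]
    push_cast
    ring
  have e2 : (∑ j ∈ Finset.range (n + 1), (Nat.choose n (j + 1) : ZMod 3) * xs.getD (j + 1) 0)
        + (Nat.choose n 0 : ZMod 3) * xs.getD 0 0
      = ∑ j ∈ Finset.range (n + 2), (Nat.choose n j : ZMod 3) * xs.getD j 0 :=
    (Finset.sum_range_succ' (fun j => (Nat.choose n j : ZMod 3) * xs.getD j 0) (n + 1)).symm
  have e3 : ∑ j ∈ Finset.range (n + 2), (Nat.choose n j : ZMod 3) * xs.getD j 0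
      = ∑ j ∈ Finset.range (n + 1), (Nat.choose n j : ZMod 3) * xs.getD j 0 := by
    rw [Finset.sum_range_succ]
    simp
  have e4 : ∑ j ∈ Finset.range (n + 1), (Nat.choose n (j + 1) : ZMod 3) * xs.getD (j + 1) 0
      = (∑ j ∈ Finset.range (n + 1), (Nat.choose n j : ZMod 3) * xs.getD j 0) - xs.getD 0 0 := by
    rw [e3] at e2
    have := e2
    simp only [Nat.choose_zero_right, Nat.cast_one, one_mul] at this
    linear_combination this
  have eL : ∑ j ∈ Finset.range (n + 1),
        (Nat.choose n j : ZMod 3) * -(xs.getD j 0 + xs.getD (j + 1) 0)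
      = -((∑ j ∈ Finset.range (n + 1), (Nat.choose n j : ZMod 3) * xs.getD j 0)
          + ∑ j ∈ Finset.range (n + 1), (Nat.choose n j : ZMod 3) * xs.getD (j + 1) 0) := by
    rw [← Finset.sum_add_distrib, ← Finset.sum_neg_distrib]
    exact Finset.sum_congr rfl fun j _ => by ring
  rw [eL, e1, Finset.sum_add_distrib, e4]
  simp only [Nat.choose_zero_right, Nat.cast_one, one_mul]
  ring

theorem pvIter_eq : ∀ (n : Nat) (xs : List (ZMod 3)), xs.length = n + 1 →
    pvIter n xs = [(-1) ^ n * pvT n xs] := by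
  intro n
  induction n with
  | zero =>
    intro xs h
    obtain ⟨x, rfl⟩ := List.length_eq_one_iff.mp h
    simp [pvIter, pvT]
  | succ m ih =>
    intro xs h
    have hs : (pvStep xs).length = m + 1 := by simp [length_pvStep, h]
    rw [show pvIter (m + 1) xs = pvIter m (pvStep xs) from rfl, ih _ hs, pvT_step m xs h]
    congr 1
    ring

theorem pvRby_enc (v : ZMod 3) : pvRby (pvEnc v) := by
  fin_cases v <;> simp only [pvRby, pvEnc] <;> decide

theorem pvDec_enc (v : ZMod 3) : pvDec (pvEnc v) = v := by
  fin_cases v <;> simp only [pvDec, pvEnc] <;> decide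

theorem pvEmit_upd (st : Char × Char × Char) (a b : Char) (ha : pvRby a) (hb : pvRby b) :
    pvEmit (pvUpd st a) b = [pvEnc (-(pvDec a + pvDec b))] := by
  rcases ha with rfl | rfl | rfl <;> rcases hb with rfl | rfl | rfl <;> rfl

theorem pvStep_cons (x y : ZMod 3) (l : List (ZMod 3)) :
    pvStep (x :: y :: l) = -(x + y) :: pvStep (y :: l) := rfl

theorem pvInner_fst : ∀ (xs : List Char) (a : Char) (st : Char × Char × Char),
    pvRby a → (∀ c ∈ xs, pvRby c) →
    (pvInner (a :: xs) st).1 = (pvStep ((a :: xs).map pvDec)).map pvEnc := by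
  intro xs
  induction xs with
  | nil => intro a st _ _; rfl
  | cons b rest ih =>
    intro a st ha hall
    have hb : pvRby b := hall b (by simp)
    have hrest : ∀ c ∈ rest, pvRby c := fun c hc => hall c (by simp [hc])
    rcases hp : pvInner (b :: rest) (pvUpd st a) with ⟨out, st2⟩
    have hout : out = (pvStep ((b :: rest).map pvDec)).map pvEnc := by
      have := ih b (pvUpd st a) hb hrest
      rw [hp] at this
      exact this
    simp only [pvInner, hp]
    rw [pvEmit_upd st a b ha hb, hout]
    simp [pvStep_cons]

theorem map_dec_map_enc (l : List (ZMod 3)) : (l.map pvEnc).map pvDec = l := by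
  induction l with
  | nil => rfl
  | cons x xs ih => simp [pvDec_enc, ih]

theorem pvOuter_eq : ∀ (n : Nat) (xs : List Char) (st : Char × Char × Char),
    (∀ c ∈ xs, pvRby c) → xs.length = n →
    pvOuter n xs st = if n ≤ 1 then xs else (pvIter (n - 1) (xs.map pvDec)).map pvEnc := by
  intro n
  induction n with
  | zero => intro xs st _ _; rfl
  | succ k ih =>
    intro xs st hall hlen
    rcases k with _ | j
    · rfl
    · rcases xs with _ | ⟨a, xs'⟩
      · simp at hlen
      rcases hp : pvInner (a :: xs') st with ⟨t, st'⟩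
      have ht : t = (pvStep ((a :: xs').map pvDec)).map pvEnc := by
        have := pvInner_fst xs' a st (hall a (by simp)) (fun c hc => hall c (by simp [hc]))
        rw [hp] at this
        exact this
      have hlt : t.length = j + 1 := by
        rw [ht]
        simp only [List.length_map, length_pvStep]
        simp at hlen ⊢
        omega
      have hallt : ∀ c ∈ t, pvRby c := by
        rw [ht]
        intro c hc
        rcases List.mem_map.mp hc with ⟨v, _, rfl⟩
        exact pvRby_enc v
      have hstep : pvOuter (j + 2) (a :: xs') st = pvOuter (j + 1) t st' := by
        simp [pvOuter, hp]
      rw [hstep, ih t st' hallt hlt]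
      have hdec : t.map pvDec = pvStep ((a :: xs').map pvDec) := by
        rw [ht, map_dec_map_enc]
      by_cases hj : j = 0
      · subst hj
        simp only [le_refl, if_pos, show ¬(0 + 2 ≤ 1) by omega, if_neg, not_false_iff]
        rw [ht]
        rfl
      · rw [if_neg (by omega), if_neg (by omega)]
        rw [show j + 1 - 1 = j from rfl, show j + 2 - 1 = j + 1 from rfl, hdec]
        rfl

-- ===== the dead path: once a pair fails to emit, the surplus passes wipe the string =====
theorem pvEmit_len (st : Char × Char × Char) (b : Char) : (pvEmit st b).length ≤ 1 := by
  unfold pvEmit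
  split_ifs <;> simp

theorem pvUpd_rby (st : Char × Char × Char) (a : Char) (h : pvStRby st) :
    pvStRby (pvUpd st a) := by
  unfold pvUpd
  split_ifs <;> first
    | exact h
    | (refine ⟨?_, ?_, ?_⟩ <;> simp [pvRby])

theorem pvUpd_invalid (st : Char × Char × Char) (a : Char) (h : pvIsColour a = false) :
    pvUpd st a = st := by
  have h' : (¬a = 'r' ∧ ¬a = 'b') ∧ ¬a = 'y' := by simpa [pvIsColour, not_or] using h
  simp [pvUpd, h'.1.1, h'.1.2, h'.2]

theorem pvEmit_invalid (st : Char × Char × Char) (b : Char) (hst : pvStRby st)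
    (hb : pvIsColour b = false) : pvEmit st b = [] := by
  have hb' : (¬b = 'r' ∧ ¬b = 'b') ∧ ¬b = 'y' := by simpa [pvIsColour, not_or] using hb
  rcases hst with ⟨h1 | h1 | h1, h2 | h2 | h2, h3 | h3 | h3⟩ <;>
    simp [pvEmit, h1, h2, h3, hb'.1.1, hb'.1.2, hb'.2]

theorem pvInner_snd_rby : ∀ (xs : List Char) (st : Char × Char × Char), pvStRby st →
    pvStRby (pvInner xs st).2 := by
  intro xs
  induction xs with
  | nil => intro st h; exact h
  | cons a rest ih =>
    rcases rest with _ | ⟨b, rest'⟩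
    · intro st h; exact h
    · intro st h
      rcases hp : pvInner (b :: rest') (pvUpd st a) with ⟨out, st2⟩
      simp only [pvInner, hp]
      have := ih (pvUpd st a) (pvUpd_rby st a h)
      rw [hp] at this
      exact this

theorem pvInner_len : ∀ (xs : List Char) (st : Char × Char × Char),
    (pvInner xs st).1.length ≤ xs.length - 1 := by
  intro xs
  induction xs with
  | nil => intro st; simp [pvInner]
  | cons a rest ih =>
    rcases rest with _ | ⟨b, rest'⟩
    · intro st; simp [pvInner]
    · intro st
      rcases hp : pvInner (b :: rest') (pvUpd st a) with ⟨out, st2⟩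
      have hout : out.length ≤ rest'.length := by
        have := ih (pvUpd st a)
        rw [hp] at this
        simpa using this
      have hemit := pvEmit_len (pvUpd st a) b
      simp only [pvInner, hp, List.length_append, List.length_cons]
      omega

-- a non-colour character anywhere past the head forces a missed emission
theorem pvInner_miss : ∀ (xs : List Char) (st : Char × Char × Char), pvStRby st →
    (∃ c ∈ xs.tail, pvIsColour c = false) →
    (pvInner xs st).1.length < xs.length - 1 := by
  intro xs
  induction xs with
  | nil => intro st _ h; simp at h
  | cons a rest ih =>
    rcases rest with _ | ⟨b, rest'⟩
    · intro st _ h; simp at h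
    · intro st hst hex
      rcases hp : pvInner (b :: rest') (pvUpd st a) with ⟨out, st2⟩
      have hst1 : pvStRby (pvUpd st a) := pvUpd_rby st a hst
      have hout : out.length ≤ rest'.length := by
        have := pvInner_len (b :: rest') (pvUpd st a)
        rw [hp] at this
        simpa using this
      by_cases hb : pvIsColour b = false
      · have hemit : pvEmit (pvUpd st a) b = [] := pvEmit_invalid _ _ hst1 hb
        simp only [pvInner, hp, hemit, List.nil_append, List.length_cons]
        omega
      · have hex' : ∃ c ∈ rest', pvIsColour c = false := by
          rcases hex with ⟨c, hc, hcf⟩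
          simp only [List.tail_cons] at hc
          rcases List.mem_cons.mp hc with rfl | hc'
          · exact absurd hcf hb
          · exact ⟨c, hc', hcf⟩
        have hlt : out.length < rest'.length + 1 - 1 := by
          have := ih (pvUpd st a) hst1 (by simpa using hex')
          rw [hp] at this
          simpa using this
        have hemit := pvEmit_len (pvUpd st a) b
        simp only [pvInner, hp, List.length_append, List.length_cons]
        omega

theorem pvOuter_dead : ∀ (n : Nat) (t : List Char) (st : Char × Char × Char),
    pvStRby st → t.length < n → pvOuter n t st = [] := by
  intro n
  induction n with
  | zero => intro t st _ h; omega
  | succ k ih =>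
    intro t st hst h
    rcases k with _ | j
    · have : t = [] := List.length_eq_zero_iff.mp (by omega)
      rw [this]
      rfl
    · rcases hp : pvInner t st with ⟨t', st'⟩
      have hstep : pvOuter (j + 2) t st = pvOuter (j + 1) t' st' := by
        simp [pvOuter, hp]
      have hlen : t'.length ≤ t.length - 1 := by
        have := pvInner_len t st
        rw [hp] at this
        exact this
      have hst' : pvStRby st' := by
        have := pvInner_snd_rby t st hst
        rw [hp] at this
        exact this
      rw [hstep]
      exact ih t' st' hst' (by omega)

theorem pvVal_cast (c : Char) (h : pvRby c) : ((pvVal c : Int) : ZMod 3) = pvDec c := by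
  rcases h with rfl | rfl | rfl <;> rfl

theorem pvChar_of_int (t : Int) :
    (['r', 'b', 'y']).getD (PySem.Int.mod t 3).toNat ' ' = pvEnc ((t : ZMod 3)) := by
  rw [PySem.Int.mod_eq_emod_of_pos (by norm_num)]
  have h0 : 0 ≤ t % 3 := Int.emod_nonneg t (by norm_num)
  have h2 : t % 3 < 3 := Int.emod_lt_of_pos t (by norm_num)
  have hcast : ((t : ZMod 3)) = (((t % (3 : Nat) : Int)) : ZMod 3) := (ZMod.intCast_mod t 3).symm
  have h3 : ((3 : Nat) : Int) = (3 : Int) := by norm_num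
  rw [h3] at hcast
  rcases (by omega : t % 3 = 0 ∨ t % 3 = 1 ∨ t % 3 = 2) with h | h | h <;>
    rw [hcast, h] <;> rfl

-- ===== Lucas: pvBinom3 computes C(n, i) in ZMod 3 =====
theorem pvC3_cast (a b : Nat) (ha : a < 3) (hb : b ≤ a) :
    ((pvC3 a b : Nat) : ZMod 3) = (Nat.choose a b : ZMod 3) := by
  interval_cases a <;> interval_cases b <;> decide

theorem pvBinom3_dec {n i : Nat} (h : ¬(n = 0 ∧ i = 0)) : n / 3 + i / 3 < n + i := by
  have h1 := Nat.div_le_self n 3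
  have h2 := Nat.div_le_self i 3
  rcases Nat.eq_zero_or_pos n with hn | hn
  · have hi : i ≠ 0 := by omega
    have := Nat.div_lt_self (Nat.pos_of_ne_zero hi) (by norm_num : 1 < 3)
    omega
  · have := Nat.div_lt_self hn (by norm_num : 1 < 3)
    omega

theorem pvBinom3Go_cast : ∀ (fuel n i : Nat), n + i ≤ fuel →
    ((pvBinom3Go fuel n i : Nat) : ZMod 3) = (Nat.choose n i : ZMod 3) := by
  haveI : Fact (Nat.Prime 3) := ⟨by norm_num⟩
  intro fuel
  induction fuel with
  | zero =>
    intro n i h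
    obtain ⟨rfl, rfl⟩ : n = 0 ∧ i = 0 := by omega
    simp [pvBinom3Go]
  | succ f ih =>
    intro n i h
    by_cases h0 : n = 0 ∧ i = 0
    · obtain ⟨rfl, rfl⟩ := h0
      simp [pvBinom3Go]
    · rw [show pvBinom3Go (f + 1) n i
          = if n = 0 ∧ i = 0 then 1
            else if i % 3 > n % 3 then 0
            else (pvBinom3Go f (n / 3) (i / 3) * pvC3 (n % 3) (i % 3)) % 3 from rfl,
        if_neg h0]
      have lucas := Choose.choose_modEq_choose_mod_mul_choose_div_nat (p := 3) (n := n) (k := i)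
      by_cases h2 : i % 3 > n % 3
      · rw [if_pos h2, (ZMod.natCast_eq_natCast_iff _ _ _).mpr lucas,
          Nat.choose_eq_zero_of_lt h2]
        simp
      · rw [if_neg h2, ZMod.natCast_mod]
        push_cast
        rw [ih _ _ (by have := pvBinom3_dec h0; omega),
          pvC3_cast (n % 3) (i % 3) (Nat.mod_lt _ (by norm_num)) (by omega)]
        rw [(ZMod.natCast_eq_natCast_iff _ _ _).mpr lucas]
        push_cast
        ring

theorem pvBinom3_cast (n i : Nat) :
    ((pvBinom3 n i : Nat) : ZMod 3) = (Nat.choose n i : ZMod 3) :=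
  pvBinom3Go_cast (n + i) n i le_rfl

theorem pvSumLoop_cast (n : Nat) : ∀ (cs : List Char) (i : Nat) (total : Int),
    (∀ c ∈ cs, pvRby c) →
    ((pvSumLoop n cs i total : Int) : ZMod 3)
      = (total : ZMod 3)
        + ∑ j ∈ Finset.range cs.length, (Nat.choose n (i + j) : ZMod 3) * pvDec (cs.getD j ' ') := by
  intro cs
  induction cs with
  | nil => intro i total _; simp [pvSumLoop]
  | cons c rest ih =>
    intro i total hall
    have hc := hall c (by simp)
    rw [show pvSumLoop n (c :: rest) i total
        = pvSumLoop n rest (i + 1) (total + (pvBinom3 n i : Int) * pvVal c) from rfl]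
    rw [ih (i + 1) _ (fun d hd => hall d (by simp [hd]))]
    simp only [List.length_cons]
    rw [Finset.sum_range_succ'
      (fun j => (Nat.choose n (i + j) : ZMod 3) * pvDec ((c :: rest).getD j ' ')) rest.length]
    have hre : ∑ j ∈ Finset.range rest.length,
          (Nat.choose n (i + (j + 1)) : ZMod 3) * pvDec ((c :: rest).getD (j + 1) ' ')
        = ∑ j ∈ Finset.range rest.length,
          (Nat.choose n (i + 1 + j) : ZMod 3) * pvDec (rest.getD j ' ') := by
      refine Finset.sum_congr rfl fun j _ => ?_
      rw [List.getD_cons_succ, show i + (j + 1) = i + 1 + j from by omega]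
    rw [hre]
    push_cast
    rw [pvVal_cast c hc, pvBinom3_cast n i]
    simp only [List.getD_cons_zero, Nat.add_zero]
    ring

theorem pvOuter_small (n : Nat) (cs : List Char) (st : Char × Char × Char) (h : n ≤ 1) :
    pvOuter n cs st = cs := by
  rcases n with _ | _ | k
  · rfl
  · rfl
  · omega

def pvInit : Char × Char × Char := ('r', 'b', 'r')

theorem pvInit_rby : pvStRby pvInit := ⟨Or.inl rfl, Or.inr (Or.inl rfl), Or.inl rfl⟩

-- the valid case: all characters are colours, so A computes the weighted binomial sum
theorem pvValid_case (cs : List Char) (hlen : ¬cs.length < 2)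
    (hall : ∀ c ∈ cs, pvRby c) :
    pvOuter cs.length cs pvInit
      = [pvEnc (((if (cs.length - 1) % 2 = 1 then -pvSumLoop (cs.length - 1) cs 0 0
                  else pvSumLoop (cs.length - 1) cs 0 0 : Int) : ZMod 3))] := by
  have hA : pvOuter cs.length cs pvInit
      = (pvIter (cs.length - 1) (cs.map pvDec)).map pvEnc := by
    rw [pvOuter_eq cs.length cs pvInit hall rfl, if_neg (by omega)]
  rw [hA, pvIter_eq (cs.length - 1) (cs.map pvDec) (by simp; omega)]
  have hT : ((pvSumLoop (cs.length - 1) cs 0 0 : Int) : ZMod 3)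
      = pvT (cs.length - 1) (cs.map pvDec) := by
    rw [pvSumLoop_cast _ cs 0 0 hall]
    unfold pvT
    rw [List.length_map, Int.cast_zero, zero_add]
    refine Finset.sum_congr rfl fun j hj => ?_
    have hj' : j < cs.length := Finset.mem_range.mp hj
    rw [Nat.zero_add, List.getD_eq_getElem _ _ hj',
      List.getD_eq_getElem _ _ (show j < (List.map pvDec cs).length by simpa using hj'),
      List.getElem_map]
  set n := cs.length - 1 with hn
  by_cases hodd : n % 2 = 1
  · rw [if_pos hodd]
    have hv : ((-pvSumLoop n cs 0 0 : Int) : ZMod 3)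
        = (-1) ^ n * pvT n (cs.map pvDec) := by
      push_cast
      rw [hT, Odd.neg_one_pow (Nat.odd_iff.mpr hodd)]
      ring
    rw [hv]
    simp
  · rw [if_neg hodd]
    have hv : ((pvSumLoop n cs 0 0 : Int) : ZMod 3)
        = (-1) ^ n * pvT n (cs.map pvDec) := by
      rw [hT, Even.neg_one_pow (Nat.even_iff.mpr (by omega))]
      ring
    rw [hv]
    simp

-- one outer step followed by the dead path
theorem pvOuter_to_dead (cs : List Char) (hlen : 2 ≤ cs.length)
    (hmiss : (pvInner cs pvInit).1.length < cs.length - 1) :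
    pvOuter cs.length cs pvInit = [] := by
  obtain ⟨j, hj⟩ : ∃ j, cs.length = j + 2 := ⟨cs.length - 2, by omega⟩
  rcases hp : pvInner cs pvInit with ⟨t, st'⟩
  have hstep : pvOuter (j + 2) cs pvInit = pvOuter (j + 1) t st' := by
    simp [pvOuter, hp]
  have hst' : pvStRby st' := by
    have := pvInner_snd_rby cs pvInit pvInit_rby
    rw [hp] at this
    exact this
  have hlt : t.length < j + 1 := by
    rw [hp] at hmiss
    simpa [hj] using hmiss
  rw [hj, hstep]
  exact pvOuter_dead (j + 1) t st' hst' hlt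

theorem pvInner_cons (a b : Char) (rest : List Char) (st : Char × Char × Char) :
    (pvInner (a :: b :: rest) st).1
      = pvEmit (pvUpd st a) b ++ (pvInner (b :: rest) (pvUpd st a)).1 := by
  rcases hp : pvInner (b :: rest) (pvUpd st a) with ⟨out, st2⟩
  simp [pvInner, hp]

theorem pvOfList_ne_empty (L : List Char) (h : L ≠ []) : String.ofList L ≠ "" := by
  intro he
  apply h
  have := congrArg String.toList he
  simpa using this

-- ===== VERDICT (by name: the statement is the Claim_ definition above) =====
theorem colour_trio_spec : Claim_unchanged_colour_trio := by
  intro colours _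
  unfold Spec_colour_trio
  intro hnd
  unfold colour_trio colour_trio_alt
  dsimp only
  by_cases hsmall : colours.toList.length < 2
  · rw [pvOuter_small _ _ _ (by omega), if_pos hsmall]
    simp
  · rw [if_neg hsmall]
    by_cases hinv : colours.toList.any (fun c => !pvIsColour c) = true
    · rw [if_pos hinv]
      obtain ⟨e, he, hef⟩ : ∃ c ∈ colours.toList, pvIsColour c = false := by
        rcases List.any_eq_true.mp hinv with ⟨c, hc, hcf⟩
        exact ⟨c, hc, by simpa using hcf⟩
      have hdead : (pvInner colours.toList pvInit).1.length < colours.toList.length - 1 := by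
        by_cases htail : ∃ c ∈ colours.toList.tail, pvIsColour c = false
        · exact pvInner_miss colours.toList pvInit pvInit_rby htail
        · -- the invalid character is the head only; ¬D_ forces the second char to be 'y'
          push_neg at htail
          obtain ⟨a, b, rest, hcs⟩ : ∃ a b rest, colours.toList = a :: b :: rest := by
            rcases h : colours.toList with _ | ⟨a, _ | ⟨b, rest⟩⟩
            · rw [h] at hsmall; simp at hsmall
            · rw [h] at hsmall; simp at hsmall
            · exact ⟨_, _, _, rfl⟩
          have hbv : pvIsColour b = true := by
            have := htail b (by rw [hcs]; simp)
            simpa using this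
          have hrv : ∀ c ∈ rest, pvIsColour c = true := by
            intro c hc
            have := htail c (by rw [hcs]; simp [hc])
            simpa using this
          have he' : e ∈ a :: b :: rest := hcs ▸ he
          have haf : pvIsColour a = false := by
            rcases List.mem_cons.mp he' with rfl | h
            · exact hef
            · exact absurd hef (htail e (by rw [hcs]; simpa using h))
          have hby : b = 'y' := by
            by_contra hbney
            apply hnd
            refine ⟨by rw [hcs]; simp, ?_, ?_, ?_⟩
            · rw [hcs]
              simp only [List.getD_cons_zero]
              exact pvContains_false a haf
            · rw [hcs]
              have : pvRby b := (pvRby_iff b).mpr hbv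
              rcases this with h | h | h
              · exact Or.inl (by simp [h])
              · exact Or.inr (by simp [h])
              · exact absurd h hbney
            · rw [hcs]
              simp only [List.drop_succ_cons, List.drop_zero]
              refine List.all_eq_true.mpr fun c hc => ?_
              rcases List.mem_cons.mp hc with rfl | hc'
              · exact pvContains_true c hbv
              · exact pvContains_true c (hrv c hc')
          have hlen := pvInner_len ('y' :: rest) pvInit
          simp only [List.length_cons] at hlen
          rw [hcs, pvInner_cons, pvUpd_invalid pvInit a haf, hby,
            show pvEmit pvInit 'y' = [] from rfl]
          simp only [List.nil_append, List.length_cons]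
          omega
      rw [show (('r', 'b', 'r') : Char × Char × Char) = pvInit from rfl,
        pvOuter_to_dead colours.toList (by omega) hdead]
    · rw [if_neg hinv]
      have hall : ∀ c ∈ colours.toList, pvRby c := by
        intro c hc
        rw [pvRby_iff]
        by_contra h
        exact hinv (List.any_eq_true.mpr ⟨c, hc, by simp [h]⟩)
      rw [show (('r', 'b', 'r') : Char × Char × Char) = pvInit from rfl,
        pvValid_case colours.toList hsmall hall, pvChar_of_int]

set_option maxRecDepth 8000 in
theorem colour_trio_changed : Claim_changed_colour_trio := by
  unfold Claim_changed_colour_trio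
  decide

theorem colour_trio_tight : Claim_exact_colour_trio := by
  intro colours _ hd
  obtain ⟨hlen, hhead, hsnd, htail⟩ := hd
  obtain ⟨a, b, rest, hcs⟩ : ∃ a b rest, colours.toList = a :: b :: rest := by
    rcases h : colours.toList with _ | ⟨a, _ | ⟨b, rest⟩⟩
    · rw [h] at hlen; simp at hlen
    · rw [h] at hlen; simp at hlen
    · exact ⟨_, _, _, rfl⟩
  rw [hcs] at hhead hsnd htail
  simp only [List.getD_cons_zero, List.getD_cons_succ] at hhead hsnd
  simp only [List.drop_succ_cons, List.drop_zero] at htail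
  have hna : ¬ pvRby a := fun hr => by
    rw [(pvRby_contains a).mp hr] at hhead
    cases hhead
  have hheadf : pvIsColour a = false := by
    rw [Bool.eq_false_iff]
    exact fun ht => hna ((pvRby_iff a).mpr ht)
  -- B returns ""
  have hB : colour_trio_alt colours = "" := by
    unfold colour_trio_alt
    dsimp only
    rw [if_neg (by rw [hcs]; simp), if_pos]
    rw [hcs]
    exact List.any_eq_true.mpr ⟨a, by simp, by simp [hheadf]⟩
  -- A returns a single colour
  have hbr : pvRby b := by rcases hsnd with h | h <;> simp [pvRby, h]
  have hrest : ∀ c ∈ rest, pvRby c := fun c hc =>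
    (pvRby_contains c).mpr (List.all_eq_true.mp htail c (List.mem_cons_of_mem _ hc))
  have hfst : (pvInner (b :: rest) pvInit).1
      = (pvStep ((b :: rest).map pvDec)).map pvEnc := pvInner_fst rest b pvInit hbr hrest
  have hemit : pvEmit pvInit b = ['r'] := by
    rcases hsnd with rfl | rfl <;> rfl
  have ht : (pvInner (a :: b :: rest) pvInit).1
      = 'r' :: (pvStep ((b :: rest).map pvDec)).map pvEnc := by
    rw [pvInner_cons, pvUpd_invalid pvInit a hheadf, hemit, hfst]
    rfl
  set t := 'r' :: (pvStep ((b :: rest).map pvDec)).map pvEnc with htdef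
  have htlen : t.length = rest.length + 1 := by
    simp [htdef, length_pvStep]
  have htall : ∀ c ∈ t, pvRby c := by
    intro c hc
    rcases List.mem_cons.mp hc with rfl | hc'
    · exact Or.inl rfl
    · rcases List.mem_map.mp hc' with ⟨v, _, rfl⟩
      exact pvRby_enc v
  rcases hp : pvInner (a :: b :: rest) pvInit with ⟨t0, st'⟩
  have ht0 : t0 = t := by rw [← ht, hp]
  have hA : colour_trio colours = String.ofList (pvOuter (rest.length + 1) t st') := by
    unfold colour_trio
    rw [hcs]
    simp only [List.length_cons]
    rw [show (('r', 'b', 'r') : Char × Char × Char) = pvInit from rfl]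
    rw [show pvOuter (rest.length + 1 + 1) (a :: b :: rest) pvInit
        = pvOuter (rest.length + 1) t0 st' from by simp [pvOuter, hp], ht0]
  have hne : pvOuter (rest.length + 1) t st' ≠ [] := by
    rw [pvOuter_eq (rest.length + 1) t st' htall htlen]
    by_cases hr : rest.length + 1 ≤ 1
    · rw [if_pos hr]
      simp [htdef]
    · rw [if_neg hr]
      rw [pvIter_eq (rest.length + 1 - 1) (t.map pvDec) (by simp [htlen])]
      simp
  rw [hA, hB]
  exact pvOfList_ne_empty _ hne
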